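-- pv_equiv track=rewrite | github.com/DCSR6667/need_to_do | bitwise_problems/magic_number/solution.py | magic_number
-- ===== SOURCE A (Python) =====
-- def magic_number(num):
--     res=0
--     base=5
--     while num>0:
--         last=num&1
--         res=res+last*base
--         base=base*5
--         num=num>>1
--     return res
-- ===== SOURCE B (Python) =====
-- def magic_number(num):
--     if num <= 0:
--         return 0
--     return 5 * int(bin(num)[2:], 5)
-- ===== Notes on version B (the rewrite author's own statement) =====
-- stated objective: idiomatic
-- what changed: Replaces the explicit bit loop with accumulator and running power of 5 by a closed-form base conversion: the binary digit string of num read as a base-5 numeral, times 5.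
import Mathlib
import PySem

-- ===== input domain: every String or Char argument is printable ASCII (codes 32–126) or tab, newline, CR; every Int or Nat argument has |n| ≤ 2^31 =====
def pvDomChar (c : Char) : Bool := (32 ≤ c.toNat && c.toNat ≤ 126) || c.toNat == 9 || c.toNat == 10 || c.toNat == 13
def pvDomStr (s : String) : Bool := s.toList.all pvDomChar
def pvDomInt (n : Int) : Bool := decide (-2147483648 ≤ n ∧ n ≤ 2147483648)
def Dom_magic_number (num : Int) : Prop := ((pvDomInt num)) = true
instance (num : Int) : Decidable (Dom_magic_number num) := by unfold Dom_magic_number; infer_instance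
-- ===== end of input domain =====

-- B replaces the bit loop by a closed-form base conversion (binary digits read in base 5, times 5); return-value equivalence only.

-- ===== PORT A =====
-- the while loop, one recursive step per iteration over the same state (res, base);
-- for num > 0, `num & 1` = mod num 2 and `num >> 1` = floordiv num 2 exactly
def magicLoop (num res base : Int) : Int :=
  if h : num > 0 then
    magicLoop (PySem.Int.floordiv num 2) (res + PySem.Int.mod num 2 * base) (base * 5)
  else res
termination_by num.toNat
decreasing_by
  have : PySem.Int.floordiv num 2 = num / 2 := PySem.Int.floordiv_eq_ediv_of_pos (by omega)
  rw [this]; omega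

def magic_number (num : Int) : Int := magicLoop num 0 5

-- ===== PORT B =====
-- bin(num)[2:] : the binary digit list of a positive number, most significant first
def binDigits : Nat → List Nat
  | 0 => []
  | (n+1) => binDigits ((n+1) / 2) ++ [(n+1) % 2]
decreasing_by omega

-- int(s, 5) : left fold acc*5 + digit over the digit string
def magic_number_alt (num : Int) : Int :=
  if num ≤ 0 then 0
  else 5 * (((binDigits num.toNat).foldl (fun a b => 5 * a + b) 0 : Nat) : Int)

-- ===== PRECONDITION & SPEC =====
def Spec_magic_number (num : Int) (out : Int) : Prop := out = magic_number_alt num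
instance (num : Int) (out : Int) : Decidable (Spec_magic_number num out) := by unfold Spec_magic_number; infer_instance

-- ===== CLAIM (what is proved, stated in full; the proofs are below) =====
def Claim_equal_magic_number : Prop := ∀ (num : Int), Dom_magic_number num → Spec_magic_number num (magic_number num)

-- ===== LEMMAS AND PROOFS =====

-- LSB-first weighted value shared by both characterisations
def gVal : Nat → Int
  | 0 => 0
  | (n+1) => ((n+1) % 2 : Nat) + 5 * gVal ((n+1) / 2)
decreasing_by omega

theorem magicLoop_eq (n : Nat) : ∀ res base : Int,
    magicLoop (n : Int) res base = res + base * gVal n := by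
  induction n using Nat.strong_induction_on with
  | _ n ih =>
    intro res base
    match n with
    | 0 => rw [magicLoop, gVal]; simp
    | (m+1) =>
      rw [magicLoop]
      have hpos : ((m+1 : Nat) : Int) > 0 := by positivity
      rw [dif_pos hpos]
      rw [show PySem.Int.floordiv ((m+1 : Nat) : Int) 2 = (((m+1) / 2 : Nat) : Int) from
        PySem.Int.floordiv_natCast (m+1) 2]
      rw [show PySem.Int.mod ((m+1 : Nat) : Int) 2 = (((m+1) % 2 : Nat) : Int) from
        PySem.Int.mod_natCast (m+1) 2]
      rw [ih ((m+1)/2) (by omega)]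
      rw [gVal]
      ring

theorem binDigits_val (n : Nat) :
    (((binDigits n).foldl (fun a b => 5 * a + b) 0 : Nat) : Int) = gVal n := by
  induction n using Nat.strong_induction_on with
  | _ n ih =>
    match n with
    | 0 => rw [binDigits, gVal]; simp
    | (m+1) =>
      rw [binDigits, gVal, List.foldl_append]
      simp only [List.foldl_cons, List.foldl_nil]
      push_cast
      rw [ih ((m+1)/2) (by omega)]
      ring

-- ===== VERDICT (by name: the statement is the Claim_ definition above) =====
theorem magic_number_spec : Claim_equal_magic_number := by
  intro num _
  unfold Spec_magic_number magic_number magic_number_alt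
  by_cases h : num ≤ 0
  · rw [magicLoop, dif_neg (by omega)]
    simp [h]
  · rw [if_neg h]
    have hn : ((num.toNat : Nat) : Int) = num := Int.toNat_of_nonneg (by omega)
    calc magicLoop num 0 5 = magicLoop ((num.toNat : Nat) : Int) 0 5 := by rw [hn]
      _ = 0 + 5 * gVal num.toNat := magicLoop_eq num.toNat 0 5
      _ = 5 * (((binDigits num.toNat).foldl (fun a b => 5 * a + b) 0 : Nat) : Int) := by
          rw [binDigits_val]; ring
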